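-- pv_equiv track=rewrite | github.com/jinha2536/mdm-arithmetic | diffusion-arithmetic/experiments/exp_maze.py | compute_corridor_segments
-- ===== SOURCE A (Python) =====
-- def compute_corridor_segments(path, roles):
--     """Extract corridor segments from the path.
--     A corridor segment is a maximal sequence of consecutive path cells
--     classified as 'corridor' (not junction/start/end).
--     Returns list of (start_path_idx, length).
--     """
--     segments = []
--     seg_start = None
--     seg_len = 0
--     for pi, ci in enumerate(path):
--         if roles.get(ci) == 'corridor':
--             if seg_start is None:
--                 seg_start = pi
--             seg_len += 1
--         else:
--             if seg_start is not None:
--                 segments.append((seg_start, seg_len))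
--             seg_start = None
--             seg_len = 0
--     if seg_start is not None:
--         segments.append((seg_start, seg_len))
--     return segments
-- ===== SOURCE B (Python) =====
-- def compute_corridor_segments(path, roles):
--     """Extract corridor segments from the path.
--     Run decomposition: precompute corridor flags, then jump run by run —
--     at each corridor cell scan to the end of its run and emit it whole.
--     Returns list of (start_path_idx, length).
--     """
--     flags = [roles.get(ci) == 'corridor' for ci in path]
--     segments = []
--     i, n = 0, len(flags)
--     while i < n:
--         if flags[i]:
--             j = i + 1
--             while j < n and flags[j]:
--                 j += 1
--             segments.append((i, j - i))
--             i = j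
--         else:
--             i += 1
--     return segments
-- ===== Notes on version B (the rewrite author's own statement) =====
-- stated objective: alternative
-- what changed: Replaces A's seg_start/seg_len state machine with post-loop flush by a run-decomposition scan over precomputed corridor flags: at each corridor cell the whole run is measured and emitted at once, so no open-segment state or final flush exists.
import Mathlib
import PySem

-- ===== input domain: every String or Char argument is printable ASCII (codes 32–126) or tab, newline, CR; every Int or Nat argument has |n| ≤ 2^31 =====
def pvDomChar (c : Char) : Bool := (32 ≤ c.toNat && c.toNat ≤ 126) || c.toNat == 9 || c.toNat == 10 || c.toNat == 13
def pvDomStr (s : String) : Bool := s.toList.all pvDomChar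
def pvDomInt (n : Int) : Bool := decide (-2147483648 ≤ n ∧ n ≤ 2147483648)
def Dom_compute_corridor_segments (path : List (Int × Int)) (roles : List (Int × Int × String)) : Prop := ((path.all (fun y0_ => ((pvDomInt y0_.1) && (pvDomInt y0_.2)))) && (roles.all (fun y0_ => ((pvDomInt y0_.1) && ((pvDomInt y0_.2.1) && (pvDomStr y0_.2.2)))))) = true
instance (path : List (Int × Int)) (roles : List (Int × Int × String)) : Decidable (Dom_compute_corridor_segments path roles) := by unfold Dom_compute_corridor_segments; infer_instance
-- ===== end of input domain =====

-- B replaces A's open-segment state machine (seg_start/seg_len + post-loop flush) by a run-decomposition scan; alternative, same cost.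


-- ===== PORT A =====
-- Shared input conversion: Python's `roles.get(ci)` on the dict built from the association list.
def pvRoleGet (roles : List (Int × Int × String)) (ci : Int × Int) : Option String :=
  PySem.Dict.get? (PySem.Dict.ofList (roles.map (fun r => ((r.1, r.2.1), r.2.2)))) ci

-- A's loop: state (segments, seg_start, seg_len), pi is the enumerate counter; post-loop flush at [].
def pvGoA (f : Int × Int → Bool) :
    List (Int × Int) → Int → List (Int × Int) → Option Int → Int → List (Int × Int)
  | [], _, segments, seg_start, seg_len =>
    match seg_start with
    | some s => segments ++ [(s, seg_len)]
    | none => segments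
  | ci :: rest, pi, segments, seg_start, seg_len =>
    if f ci then
      match seg_start with
      | none => pvGoA f rest (pi + 1) segments (some pi) (seg_len + 1)
      | some s => pvGoA f rest (pi + 1) segments (some s) (seg_len + 1)
    else
      match seg_start with
      | some s => pvGoA f rest (pi + 1) (segments ++ [(s, seg_len)]) none 0
      | none => pvGoA f rest (pi + 1) segments none 0

def compute_corridor_segments (path : List (Int × Int)) (roles : List (Int × Int × String)) : List (Int × Int) :=
  pvGoA (fun ci => pvRoleGet roles ci == some "corridor") path 0 [] none 0

-- ===== PORT B =====
-- B's run scanner: on a corridor flag the inner `while j < n and flags[j]` scan is the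
-- takeWhile over the rest of the list, and `i = j` skips the run (dropWhile).
def pvSegs : List Bool → Int → List (Int × Int)
  | [], _ => []
  | false :: rest, i => pvSegs rest (i + 1)
  | true :: rest, i =>
    let run : Int := 1 + ((rest.takeWhile id).length : Int)
    (i, run) :: pvSegs (rest.dropWhile id) (i + run)
termination_by fl _ => fl.length
decreasing_by
  · simp
  · exact Nat.lt_succ_of_le (List.length_dropWhile_le id rest)

def compute_corridor_segments_alt (path : List (Int × Int)) (roles : List (Int × Int × String)) : List (Int × Int) :=
  pvSegs (path.map (fun ci => pvRoleGet roles ci == some "corridor")) 0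

-- ===== PRECONDITION & SPEC =====
def Spec_compute_corridor_segments (path : List (Int × Int)) (roles : List (Int × Int × String)) (out : List (Int × Int)) : Prop := out = compute_corridor_segments_alt path roles
instance (path : List (Int × Int)) (roles : List (Int × Int × String)) (out : List (Int × Int)) : Decidable (Spec_compute_corridor_segments path roles out) := by unfold Spec_compute_corridor_segments; infer_instance

-- ===== CLAIM (what is proved, stated in full; the proofs are below) =====
def Claim_equal_compute_corridor_segments : Prop := ∀ (path : List (Int × Int)) (roles : List (Int × Int × String)), Dom_compute_corridor_segments path roles → Spec_compute_corridor_segments path roles (compute_corridor_segments path roles)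

-- ===== LEMMAS AND PROOFS =====
-- takeWhile/dropWhile on a cons of Bool with predicate id reduce definitionally:
lemma tw_true (l : List Bool) : (true :: l).takeWhile id = true :: l.takeWhile id := rfl
lemma dw_true (l : List Bool) : (true :: l).dropWhile id = l.dropWhile id := rfl
lemma tw_false (l : List Bool) : (false :: l).takeWhile id = [] := rfl
lemma dw_false (l : List Bool) : (false :: l).dropWhile id = false :: l := rfl

-- Joint invariant: A's fold with no open segment produces B's run list from here on;
-- with an open segment (some s, len) it closes it after the leading run of trues.
lemma pvGoA_inv (f : Int × Int → Bool) (fl : List (Int × Int)) :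
    (∀ (i : Int) (segs : List (Int × Int)),
      pvGoA f fl i segs none 0 = segs ++ pvSegs (fl.map f) i) ∧
    (∀ (i : Int) (segs : List (Int × Int)) (s len : Int),
      pvGoA f fl i segs (some s) len =
        segs ++ (s, len + (((fl.map f).takeWhile id).length : Int)) ::
          pvSegs ((fl.map f).dropWhile id) (i + (((fl.map f).takeWhile id).length : Int))) := by
  induction fl with
  | nil =>
    constructor
    · intro i segs; simp [pvGoA, pvSegs]
    · intro i segs s len; simp [pvGoA, pvSegs]
  | cons ci rest ih =>
    obtain ⟨ih_idle, ih_act⟩ := ih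
    by_cases h : f ci
    · constructor
      · intro i segs
        simp only [pvGoA, h, if_true, List.map_cons]
        rw [ih_act]
        simp only [pvSegs]
        push_cast
        ring_nf
      · intro i segs s len
        simp only [pvGoA, h, if_true, List.map_cons]
        rw [ih_act]
        simp only [tw_true, dw_true, List.length_cons]
        push_cast
        ring_nf
    · simp only [Bool.not_eq_true] at h
      constructor
      · intro i segs
        simp only [pvGoA, h, Bool.false_eq_true, if_false, List.map_cons]
        rw [ih_idle]
        simp only [pvSegs]
      · intro i segs s len
        simp only [pvGoA, h, Bool.false_eq_true, if_false, List.map_cons]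
        rw [ih_idle]
        simp only [tw_false, dw_false, List.length_nil, Nat.cast_zero, add_zero, pvSegs,
          List.append_assoc, List.singleton_append]

-- ===== VERDICT (by name: the statement is the Claim_ definition above) =====
theorem compute_corridor_segments_spec : Claim_equal_compute_corridor_segments := by
  intro path roles _
  unfold Spec_compute_corridor_segments compute_corridor_segments compute_corridor_segments_alt
  rw [(pvGoA_inv _ path).1]
  simp
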